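-- pv_equiv track=rewrite | github.com/AdamZhouSE/pythonHomework | Code/CodeRecords/2609/60643/300618.py | solution
-- ===== SOURCE A (Python) =====
-- def solution(a,k):
--     dt={}
--     l=[]
--     for i in a:
--         if i not in dt:
--             dt[i]=1
--         else:
--             dt[i]+=1
--     for ky,val in dt.items():
--         if val==1:
--             l.append(ky)
--     if len(l)==0:
--         return -1
--     elif k>len(l):
--         return -1
--     else:
--         return l[k-1]
-- ===== SOURCE B (Python) =====
-- def solution(a, k):
--     # Worklist elimination: repeatedly take the front element; if it recurs
--     # in the rest, delete ALL its copies from the worklist, otherwise it is a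
--     # singleton and is emitted.  No frequency counting at all.
--     out = []
--     rest = a
--     while rest:
--         x, tail = rest[0], rest[1:]
--         if x in tail:
--             rest = [y for y in tail if y != x]
--         else:
--             out.append(x)
--             rest = tail
--     if len(out) == 0:
--         return -1
--     elif k > len(out):
--         return -1
--     else:
--         return out[k - 1]
-- ===== Notes on version B (the rewrite author's own statement) =====
-- stated objective: alternative
-- what changed: Replaces the frequency dict plus dict-items scan by a duplicate-elimination worklist: take the front element, and either delete all of its copies from the worklist (if it recurs) or emit it as a singleton; no counts are ever maintained.
import Mathlib
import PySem

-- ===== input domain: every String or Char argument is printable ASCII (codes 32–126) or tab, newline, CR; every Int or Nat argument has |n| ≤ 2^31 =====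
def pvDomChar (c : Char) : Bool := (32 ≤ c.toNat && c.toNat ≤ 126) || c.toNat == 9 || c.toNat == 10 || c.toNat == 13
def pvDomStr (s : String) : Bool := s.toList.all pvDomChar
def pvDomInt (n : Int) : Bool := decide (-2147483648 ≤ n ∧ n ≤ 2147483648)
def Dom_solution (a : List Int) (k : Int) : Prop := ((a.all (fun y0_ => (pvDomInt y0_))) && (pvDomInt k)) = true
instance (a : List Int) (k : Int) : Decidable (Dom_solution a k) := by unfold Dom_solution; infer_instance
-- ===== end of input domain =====

-- B replaces A's frequency dict + dict-items scan by a duplicate-elimination worklist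
-- (delete all copies of a recurring front element, emit a non-recurring one); return
-- values agree on all inputs where A returns; neither mutates its arguments.

-- ===== PORT A =====
def solution (a : List Int) (k : Int) : Int :=
  -- dt = {}; for i in a: if i not in dt: dt[i]=1 else: dt[i]+=1
  let dt : PySem.Dict Int Int := a.foldl (fun d i =>
    if d.contains i = false then d.insert i 1
    else d.insert i ((d.get? i).getD 0 + 1)) PySem.Dict.empty
  -- l = []; for ky,val in dt.items(): if val==1: l.append(ky)
  let l : List Int := dt.items.foldl (fun l kv => if kv.2 == 1 then l ++ [kv.1] else l) []
  if l.length = 0 then -1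
  else if k > (l.length : Int) then -1
  else (PySem.List.pyGet? l (k - 1)).getD 0   -- l[k-1]; none = IndexError, excluded by Pre_

-- ===== PORT B =====
-- the while-loop of Source B: [y for y in tail if y != x], then state = (out, rest)
def removeAll (x : Int) (l : List Int) : List Int := l.filter (fun y => !(y == x))

def singlesLoop (out rest : List Int) : List Int :=
  match rest with
  | [] => out
  | x :: tail =>
    if x ∈ tail then singlesLoop out (removeAll x tail)
    else singlesLoop (out ++ [x]) tail
termination_by rest.length
decreasing_by
  all_goals simp only [List.length_cons, Nat.lt_succ_iff]
  · exact List.length_filter_le _ _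
  · exact le_refl _

def solution_alt (a : List Int) (k : Int) : Int :=
  let out := singlesLoop [] a
  if out.length = 0 then -1
  else if k > (out.length : Int) then -1
  else (PySem.List.pyGet? out (k - 1)).getD 0   -- out[k-1]; none = IndexError, excluded by Pre_

-- ===== PRECONDITION & SPEC =====
-- Excludes exactly the inputs where Python's l[k-1] raises IndexError in both programs
-- (the singleton list is nonempty, k ≤ its length, and k-1 is below the negative-index range).
def Pre_solution (a : List Int) (k : Int) : Prop :=
  (a.filter (fun i => a.count i == 1)).length = 0 ∨
  1 - ((a.filter (fun i => a.count i == 1)).length : Int) ≤ k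
instance (a : List Int) (k : Int) : Decidable (Pre_solution a k) := by unfold Pre_solution; infer_instance

def pvWitness_solution : List Int × Int := ([1, 2, 2, 3], 2)

def Spec_solution (a : List Int) (k : Int) (out : Int) : Prop := out = solution_alt a k
instance (a : List Int) (k : Int) (out : Int) : Decidable (Spec_solution a k out) := by unfold Spec_solution; infer_instance

-- ===== CLAIM (what is proved, stated in full; the proofs are below) =====
def Claim_equal_solution : Prop := ∀ (a : List Int) (k : Int), Dom_solution a k → Pre_solution a k → Spec_solution a k (solution a k)

-- ===== LEMMAS AND PROOFS =====

-- A's counting loop is collections.Counter (the two step functions agree pointwise).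
lemma dt_eq_counter (a : List Int) :
    a.foldl (fun d i =>
      if d.contains i = false then d.insert i 1
      else d.insert i ((d.get? i).getD 0 + 1)) PySem.Dict.empty = PySem.Dict.counter a := by
  rw [← PySem.Dict.foldl_insert_getD_add_one_eq_counter]
  congr 1
  funext d i
  rw [PySem.Dict.getD_eq_get?_getD]
  by_cases h : d.contains i = false
  · simp [h]
    rw [PySem.Dict.contains_eq_isSome_get?] at h
    cases hg : d.get? i with
    | none => simp
    | some v => simp [hg] at h
  · simp [h]

-- Deduplicating first keeps a filter unchanged when the predicate only holds for elements
-- occurring at most once (specific shape of A's dict-items scan vs the singleton filter).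
lemma filter_ofList_of_count_le_one (l : List Int) (p : Int → Bool)
    (h : ∀ x ∈ l, p x = true → l.count x ≤ 1) :
    (PySem.Set.ofList l).filter p = l.filter p := by
  induction l with
  | nil => simp [PySem.Set.ofList]
  | cons x xs ih =>
    have hx' : ∀ y ∈ xs, p y = true → xs.count y ≤ 1 := by
      intro y hy hp
      have := h y (List.mem_cons_of_mem _ hy) hp
      have hc : (x :: xs).count y = xs.count y + if y = x then 1 else 0 := by
        by_cases hxy : y = x
        · simp [hxy]
        · have hne : ¬x = y := fun h2 => hxy h2.symm
          simp [hxy, List.count_cons_of_ne hne]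
      omega
    rw [PySem.Set.ofList_cons]
    by_cases hp : p x = true
    · have hcnt := h x (List.mem_cons_self) hp
      have hxnot : x ∉ xs := by
        intro hmem
        have : 1 ≤ xs.count x := List.one_le_count_iff.mpr hmem
        have hc : (x :: xs).count x = xs.count x + 1 := by simp
        omega
      have hdisc : (PySem.Set.ofList xs).discard x = PySem.Set.ofList xs := by
        unfold PySem.Set.discard
        apply List.filter_eq_self.mpr
        intro y hy
        have hmem : y ∈ xs := (PySem.Set.mem_ofList xs y).mp hy
        simp only [Bool.not_eq_true', beq_eq_false_iff_ne]
        exact fun hyx => hxnot (hyx ▸ hmem)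
      simp [hp, hdisc, ih hx']
    · rw [List.filter_cons, if_neg hp, List.filter_cons, if_neg hp]
      unfold PySem.Set.discard
      rw [List.filter_filter]
      have : ∀ y ∈ PySem.Set.ofList xs, ((p y && !(y == x)) = p y) := by
        intro y hy
        by_cases hpy : p y = true
        · have hyx : y ≠ x := by
            intro hyxeq; rw [hyxeq] at hpy; exact hp hpy
          simp [hpy, hyx]
        · simp [Bool.eq_false_iff.mpr hpy]
      rw [List.filter_congr this, ih hx']

-- A's singleton list equals the order-preserving singleton filter.
lemma listA_eq_filter (a : List Int) :
    ((PySem.Dict.counter a).items.foldl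
      (fun l kv => if kv.2 == 1 then l ++ [kv.1] else l) ([] : List Int)) =
    a.filter (fun i => a.count i == 1) := by
  rw [PySem.List.foldl_append_if (fun kv : Int × Int => kv.2 == 1) Prod.fst]
  rw [PySem.Dict.items_counter, List.filter_map, List.map_map]
  have hpred : (fun kv : Int × Int => kv.2 == 1) ∘ (fun x => (x, (a.count x : Int))) =
      fun i => a.count i == 1 := by
    funext x
    by_cases h : a.count x = 1 <;> simp [Function.comp, h]
  rw [hpred]
  have h1 : ∀ x ∈ a, (a.count x == 1) = true → a.count x ≤ 1 := by
    intro x _ hx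
    have : a.count x = 1 := by simpa using hx
    omega
  rw [filter_ofList_of_count_le_one a _ h1]
  simp only [Function.comp_def]
  exact List.map_id _

-- Worklist step, recurring front: deleting all copies of x preserves the singleton filter.
lemma filter_cons_mem (x : Int) (tail : List Int) (h : x ∈ tail) :
    (x :: tail).filter (fun i => (x :: tail).count i == 1) =
    (tail.filter (fun y => !(y == x))).filter
      (fun i => (tail.filter (fun y => !(y == x))).count i == 1) := by
  have hx : ((x :: tail).count x == 1) = false := by
    have h1 : 1 ≤ tail.count x := List.one_le_count_iff.mpr h
    have h2 : (x :: tail).count x = tail.count x + 1 := by simp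
    simp only [beq_eq_false_iff_ne]
    omega
  rw [List.filter_cons]
  simp only [hx, Bool.false_eq_true, if_false]
  have step1 : tail.filter (fun i => (x :: tail).count i == 1) =
      tail.filter (fun i => ((x :: tail).count i == 1) && !(i == x)) := by
    apply List.filter_congr
    intro y _
    by_cases hyx : y = x
    · subst hyx
      simp only [hx, beq_self_eq_true, Bool.not_true, Bool.and_false]
    · simp [hyx]
  rw [step1, ← List.filter_filter]
  apply List.filter_congr
  intro y hy
  have hyx : y ≠ x := by
    have := List.of_mem_filter hy
    simpa using this
  have hcnt : (x :: tail).count y = (tail.filter (fun y => !(y == x))).count y := by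
    rw [List.count_cons_of_ne (fun h2 => hyx h2.symm)]
    rw [List.count_filter (by simpa using hyx)]
  rw [hcnt]

-- Worklist step, non-recurring front: x is a singleton and the tail filter is unchanged.
lemma filter_cons_not_mem (x : Int) (tail : List Int) (h : x ∉ tail) :
    (x :: tail).filter (fun i => (x :: tail).count i == 1) =
    x :: tail.filter (fun i => tail.count i == 1) := by
  have hx : ((x :: tail).count x == 1) = true := by
    have : tail.count x = 0 := List.count_eq_zero.mpr h
    simp [this]
  rw [List.filter_cons]
  simp only [hx, if_true]
  congr 1
  apply List.filter_congr
  intro y hy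
  have hyx : y ≠ x := fun he => h (he ▸ hy)
  rw [List.count_cons_of_ne (fun h2 => hyx h2.symm)]

-- Loop invariant: the worklist loop produces out ++ the singleton filter of rest.
lemma singlesLoop_eq (out rest : List Int) :
    singlesLoop out rest = out ++ rest.filter (fun i => rest.count i == 1) := by
  induction out, rest using singlesLoop.induct with
  | case1 out => simp [singlesLoop]
  | case2 out x tail hmem ih =>
    rw [singlesLoop, if_pos hmem, ih, filter_cons_mem x tail hmem]
    rfl
  | case3 out x tail hmem ih =>
    rw [singlesLoop, if_neg hmem, ih, filter_cons_not_mem x tail hmem]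
    simp

-- ===== VERDICT (by name: the statement is the Claim_ definition above) =====
theorem solution_spec : Claim_equal_solution := by
  intro a k _ _
  unfold Spec_solution
  simp only [solution, solution_alt]
  rw [dt_eq_counter, listA_eq_filter, singlesLoop_eq]
  simp
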